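-- pv_equiv track=rewrite | github.com/tqmsh/LC | greedy/C. DIY.py | solve
-- ===== SOURCE A (Python) =====
-- def solve(arr):
--     from collections import Counter
--     import math
--     # 贪心：从小到大排序，枚举极数能用则用
--
--     freq = Counter(arr)
--     pair_count = sum(count // 2 for count in freq.values())
--
--     if pair_count < 4: return "NO"
--
--     mx1 = -math.inf  # 第一大的值
--     mx2 = -math.inf  # 第二大的值
--     mn1 = math.inf   # 第一小的值
--     mn2 = math.inf   # 第二小的值
--
--
--     for val, count in freq.items():
--         if count >= 4:
--             # 如果某个值至少出现 4 次，则可以同时充当最大值和最小值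
--             mx1 = max(mx1, val)
--             mx2 = max(mx2, val)
--             mn1 = min(mn1, val)
--             mn2 = min(mn2, val)
--         elif count >= 2:
--             # 最大 次大 模版
--             # 如果某个值至少出现 2 次，可以作为潜在的次大值或次小值
--             if val > mx1:
--                 mx2 = mx1
--                 mx1 = val
--             elif val > mx2:
--                 mx2 = val
--
--             if val < mn1:
--                 mn2 = mn1
--                 mn1 = val
--             elif val < mn2:
--                 mn2 = val
--
--     # 输出结果，按构造的 8 个点顺序排列
--     return f"YES\n{mn1} {mn2} {mn1} {mx1} {mx2} {mn2} {mx2} {mx1}"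
-- ===== SOURCE B (Python) =====
-- def solve(arr):
--     from collections import Counter
--     freq = Counter(arr)
--     pair_count = sum(count // 2 for count in freq.values())
--     if pair_count < 4:
--         return "NO"
--     # collect usable extreme candidates: a value with >=4 copies can serve
--     # twice, one with 2-3 copies once; sort once and read both ends
--     L = []
--     for val, count in freq.items():
--         if count >= 4:
--             L.append(val)
--             L.append(val)
--         elif count >= 2:
--             L.append(val)
--     L.sort()
--     mn1, mn2 = L[0], L[1]
--     mx1, mx2 = L[-1], L[-2]
--     return f"YES\n{mn1} {mn2} {mn1} {mx1} {mx2} {mn2} {mx2} {mx1}"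
-- ===== Notes on version B (the rewrite author's own statement) =====
-- stated objective: simpler
-- what changed: Replaces A's four interleaved online top-2/bottom-2 trackers seeded with +/-inf by building the list of usable extreme candidates (two copies for count>=4, one for count 2-3), sorting it once and reading both ends.
import Mathlib
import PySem

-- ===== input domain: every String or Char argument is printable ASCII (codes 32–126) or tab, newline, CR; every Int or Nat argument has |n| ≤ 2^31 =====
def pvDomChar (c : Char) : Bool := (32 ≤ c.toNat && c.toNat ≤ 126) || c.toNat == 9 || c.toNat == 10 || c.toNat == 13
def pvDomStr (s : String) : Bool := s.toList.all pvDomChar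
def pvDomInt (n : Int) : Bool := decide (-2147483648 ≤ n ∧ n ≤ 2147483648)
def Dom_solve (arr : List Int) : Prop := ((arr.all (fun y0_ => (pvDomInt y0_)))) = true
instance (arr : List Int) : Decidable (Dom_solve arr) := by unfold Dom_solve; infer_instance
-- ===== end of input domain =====

-- B replaces A's four interleaved online top-2/bottom-2 trackers (seeded with ±inf) by
-- building the list of usable extreme candidates, sorting it once and reading both ends
-- (objective: simpler).

-- ===== PORT A =====
-- A mixes math.inf into int min/max; `none` models +inf on the mn side and -inf on the mx side.
def fmtPosInf : Option Int → String
  | none => "inf"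
  | some n => PySem.Int.toStr n

def fmtNegInf : Option Int → String
  | none => "-inf"
  | some n => PySem.Int.toStr n

def minInf : Option Int → Int → Option Int
  | none, v => some v
  | some m, v => some (min m v)

def maxInf : Option Int → Int → Option Int
  | none, v => some v
  | some m, v => some (max m v)

def ltPosInf (v : Int) : Option Int → Bool
  | none => true
  | some m => decide (v < m)

def gtNegInf (v : Int) : Option Int → Bool
  | none => true
  | some m => decide (m < v)

-- the body of A's `for val, count in freq.items()` loop; state is (mx1, mx2, mn1, mn2)
def stepA (st : Option Int × Option Int × Option Int × Option Int) (p : Int × Int) :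
    Option Int × Option Int × Option Int × Option Int :=
  match st with
  | (mx1, mx2, mn1, mn2) =>
    if 4 ≤ p.2 then
      (maxInf mx1 p.1, maxInf mx2 p.1, minInf mn1 p.1, minInf mn2 p.1)
    else if 2 ≤ p.2 then
      let mx := if gtNegInf p.1 mx1 then (some p.1, mx1)
                else if gtNegInf p.1 mx2 then (mx1, some p.1) else (mx1, mx2)
      let mn := if ltPosInf p.1 mn1 then (some p.1, mn1)
                else if ltPosInf p.1 mn2 then (mn1, some p.1) else (mn1, mn2)
      (mx.1, mx.2, mn.1, mn.2)
    else (mx1, mx2, mn1, mn2)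

def solve (arr : List Int) : String :=
  let freq := PySem.Dict.counter arr
  let pair_count := freq.values.foldl (fun acc c => acc + PySem.Int.floordiv c 2) 0
  if pair_count < 4 then "NO"
  else
    match freq.items.foldl stepA (none, none, none, none) with
    | (mx1, mx2, mn1, mn2) =>
      "YES\n" ++ fmtPosInf mn1 ++ " " ++ fmtPosInf mn2 ++ " " ++ fmtPosInf mn1 ++ " " ++
        fmtNegInf mx1 ++ " " ++ fmtNegInf mx2 ++ " " ++ fmtPosInf mn2 ++ " " ++
        fmtNegInf mx2 ++ " " ++ fmtNegInf mx1

-- ===== PORT B =====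
-- what one (val, count) item adds to B's candidate list L
def contribB (p : Int × Int) : List Int :=
  if 4 ≤ p.2 then [p.1, p.1] else if 2 ≤ p.2 then [p.1] else []

-- the .getD 0 defaults are unreachable: under the pair_count guard L has ≥ 2 elements
-- (Python B's L[0] etc. never raise there)
def solve_alt (arr : List Int) : String :=
  let freq := PySem.Dict.counter arr
  let pair_count := freq.values.foldl (fun acc c => acc + PySem.Int.floordiv c 2) 0
  if pair_count < 4 then "NO"
  else
    let L := freq.items.foldl (fun L p => L ++ contribB p) []
    let s := PySem.List.sorted L (fun x => x)
    let mn1 := (PySem.List.pyGet? s 0).getD 0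
    let mn2 := (PySem.List.pyGet? s 1).getD 0
    let mx1 := (PySem.List.pyGet? s (-1)).getD 0
    let mx2 := (PySem.List.pyGet? s (-2)).getD 0
    "YES\n" ++ PySem.Int.toStr mn1 ++ " " ++ PySem.Int.toStr mn2 ++ " " ++ PySem.Int.toStr mn1 ++ " " ++
      PySem.Int.toStr mx1 ++ " " ++ PySem.Int.toStr mx2 ++ " " ++ PySem.Int.toStr mn2 ++ " " ++
      PySem.Int.toStr mx2 ++ " " ++ PySem.Int.toStr mx1

-- ===== PRECONDITION & SPEC =====
def Spec_solve (arr : List Int) (out : String) : Prop := out = solve_alt arr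
instance (arr : List Int) (out : String) : Decidable (Spec_solve arr out) := by unfold Spec_solve; infer_instance

-- ===== CLAIM (what is proved, stated in full; the proofs are below) =====
def Claim_equal_solve : Prop := ∀ (arr : List Int), Dom_solve arr → Spec_solve arr (solve arr)

-- ===== LEMMAS AND PROOFS =====

-- single insertion into a bottom-2 / top-2 tracker (the elif-branch of A's loop)
def ins2min (st : Option Int × Option Int) (v : Int) : Option Int × Option Int :=
  if ltPosInf v st.1 then (some v, st.1) else if ltPosInf v st.2 then (st.1, some v) else st

def ins2max (st : Option Int × Option Int) (v : Int) : Option Int × Option Int :=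
  if gtNegInf v st.1 then (some v, st.1) else if gtNegInf v st.2 then (st.1, some v) else st

def ValidMin : Option Int × Option Int → Prop
  | (none, none) => True
  | (none, some _) => False
  | (some _, none) => True
  | (some a, some b) => a ≤ b

def ValidMax : Option Int × Option Int → Prop
  | (none, none) => True
  | (none, some _) => False
  | (some _, none) => True
  | (some a, some b) => b ≤ a

theorem validMin_ins2min (st : Option Int × Option Int) (v : Int) (h : ValidMin st) :
    ValidMin (ins2min st v) := by
  obtain ⟨m1, m2⟩ := st
  cases m1 <;> cases m2 <;>
    simp_all [ins2min, ltPosInf, ValidMin] <;> split_ifs <;> simp_all [ValidMin] <;> omega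

theorem validMax_ins2max (st : Option Int × Option Int) (v : Int) (h : ValidMax st) :
    ValidMax (ins2max st v) := by
  obtain ⟨m1, m2⟩ := st
  cases m1 <;> cases m2 <;>
    simp_all [ins2max, gtNegInf, ValidMax] <;> split_ifs <;> simp_all [ValidMax] <;> omega

theorem ins2min_twice (st : Option Int × Option Int) (v : Int) (h : ValidMin st) :
    ins2min (ins2min st v) v = (minInf st.1 v, minInf st.2 v) := by
  obtain ⟨m1, m2⟩ := st
  cases m1 <;> cases m2 <;>
    simp_all [ins2min, ltPosInf, ValidMin, minInf] <;> split_ifs <;>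
      simp_all [minInf] <;> omega

theorem ins2max_twice (st : Option Int × Option Int) (v : Int) (h : ValidMax st) :
    ins2max (ins2max st v) v = (maxInf st.1 v, maxInf st.2 v) := by
  obtain ⟨m1, m2⟩ := st
  cases m1 <;> cases m2 <;>
    simp_all [ins2max, gtNegInf, ValidMax, maxInf] <;> split_ifs <;>
      simp_all [maxInf] <;> omega

-- A's combined fold splits into independent top-2 / bottom-2 folds over the flattened candidates
theorem foldA_split (its : List (Int × Int)) (mx mn : Option Int × Option Int)
    (hmx : ValidMax mx) (hmn : ValidMin mn) :
    its.foldl stepA (mx.1, mx.2, mn.1, mn.2) =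
      (((its.flatMap contribB).foldl ins2max mx).1, ((its.flatMap contribB).foldl ins2max mx).2,
       ((its.flatMap contribB).foldl ins2min mn).1, ((its.flatMap contribB).foldl ins2min mn).2) := by
  
  induction its generalizing mx mn with
  | nil => simp
  | cons p r ih =>
    obtain ⟨v, c⟩ := p
    simp only [List.foldl_cons, List.flatMap_cons]
    by_cases h4 : 4 ≤ c
    · have hstep : stepA (mx.1, mx.2, mn.1, mn.2) (v, c) =
          ((ins2max (ins2max mx v) v).1, (ins2max (ins2max mx v) v).2,
           (ins2min (ins2min mn v) v).1, (ins2min (ins2min mn v) v).2) := by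
        rw [ins2max_twice mx v hmx, ins2min_twice mn v hmn]
        simp [stepA, h4]
      rw [hstep, ih (ins2max (ins2max mx v) v) (ins2min (ins2min mn v) v)
        (validMax_ins2max _ v (validMax_ins2max _ v hmx))
        (validMin_ins2min _ v (validMin_ins2min _ v hmn))]
      simp [contribB, h4]
    · by_cases h2 : 2 ≤ c
      · have hstep : stepA (mx.1, mx.2, mn.1, mn.2) (v, c) =
            ((ins2max mx v).1, (ins2max mx v).2, (ins2min mn v).1, (ins2min mn v).2) := by
          simp [stepA, h4, h2, ins2max, ins2min]
        rw [hstep, ih (ins2max mx v) (ins2min mn v)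
          (validMax_ins2max _ v hmx) (validMin_ins2min _ v hmn)]
        simp [contribB, h4, h2]
      · have hstep : stepA (mx.1, mx.2, mn.1, mn.2) (v, c) = (mx.1, mx.2, mn.1, mn.2) := by
          simp [stepA, h4, h2]
        rw [hstep, ih mx mn hmx hmn]
        simp [contribB, h4, h2]

-- B's append loop is flatMap
theorem foldB_flatMap (its : List (Int × Int)) (acc : List Int) :
    its.foldl (fun L p => L ++ contribB p) acc = acc ++ its.flatMap contribB := by
  induction its generalizing acc with
  | nil => simp
  | cons p r ih => simp [ih, List.flatMap_cons]

-- first two elements of an insertBy-insertion, in tracker form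
theorem first2_insertBy_min (s : List Int) (v : Int) :
    (((PySem.List.insertBy (fun a b => decide (a < b)) v s)[0]?),
     ((PySem.List.insertBy (fun a b => decide (a < b)) v s)[1]?)) =
      ins2min (s[0]?, s[1]?) v := by
  
  cases s with
  | nil => simp [PySem.List.insertBy, ins2min, ltPosInf]
  | cons a s' =>
    cases s' with
    | nil => by_cases h : v < a <;> simp [PySem.List.insertBy, ins2min, ltPosInf, h]
    | cons b t =>
      by_cases h1 : v < a <;> by_cases h2 : v < b <;>
        simp [PySem.List.insertBy, ins2min, ltPosInf, h1, h2]

theorem first2_insertBy_max (s : List Int) (v : Int) :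
    (((PySem.List.insertBy (fun a b => decide (b < a)) v s)[0]?),
     ((PySem.List.insertBy (fun a b => decide (b < a)) v s)[1]?)) =
      ins2max (s[0]?, s[1]?) v := by
  
  cases s with
  | nil => simp [PySem.List.insertBy, ins2max, gtNegInf]
  | cons a s' =>
    cases s' with
    | nil => by_cases h : a < v <;> simp [PySem.List.insertBy, ins2max, gtNegInf, h]
    | cons b t =>
      by_cases h1 : a < v <;> by_cases h2 : b < v <;>
        simp [PySem.List.insertBy, ins2max, gtNegInf, h1, h2]

-- the bottom-2 fold reads the first two elements of the ascending sort
theorem fold_ins2min_sorted (l : List Int) :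
    l.foldl ins2min (none, none) =
      ((PySem.List.sorted l (fun x => x))[0]?, (PySem.List.sorted l (fun x => x))[1]?) := by
  
  induction l using List.reverseRecOn with
  | nil => rw [PySem.List.sorted_eq_foldl_insertBy]; simp
  | append_singleton l v ih =>
    have hs : PySem.List.sorted (l ++ [v]) (fun x => x) =
        PySem.List.insertBy (fun a b : Int => decide (a < b)) v (PySem.List.sorted l (fun x => x)) := by
      rw [PySem.List.sorted_eq_foldl_insertBy, PySem.List.sorted_eq_foldl_insertBy, List.foldl_append]
      rfl
    rw [List.foldl_append]
    simp only [List.foldl]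
    rw [ih, hs, first2_insertBy_min]

-- the top-2 fold reads the first two elements of the descending sort
theorem fold_ins2max_sorted (l : List Int) :
    l.foldl ins2max (none, none) =
      ((PySem.List.sorted l (fun x => x) true)[0]?, (PySem.List.sorted l (fun x => x) true)[1]?) := by
  
  induction l using List.reverseRecOn with
  | nil => rw [PySem.List.sorted_rev_eq_foldl_insertBy]; simp
  | append_singleton l v ih =>
    have hs : PySem.List.sorted (l ++ [v]) (fun x => x) true =
        PySem.List.insertBy (fun a b : Int => decide (b < a)) v (PySem.List.sorted l (fun x => x) true) := by
      rw [PySem.List.sorted_rev_eq_foldl_insertBy, PySem.List.sorted_rev_eq_foldl_insertBy, List.foldl_append]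
      rfl
    rw [List.foldl_append]
    simp only [List.foldl]
    rw [ih, hs, first2_insertBy_max]

-- descending sort = reverse of ascending sort (Int values; sorted lists are unique)
theorem sorted_true_eq_reverse (l : List Int) :
    PySem.List.sorted l (fun x => x) true = (PySem.List.sorted l (fun x => x)).reverse := by
  
  apply List.eq_of_perm_of_sorted (le := fun a b : Int => b ≤ a)
  · intro a b _ _ h1 h2; omega
  · exact PySem.List.sorted_pairwise_rev l (fun x => x)
  · exact List.pairwise_reverse.mpr (PySem.List.sorted_pairwise l (fun x => x))
  · exact (PySem.List.sorted_perm l (fun x => x) true).trans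
      (((PySem.List.sorted_perm l (fun x => x) false).symm).trans
        (List.reverse_perm _).symm)

-- pair_count bounds the candidate count from below
theorem flat_len_zero (its : List (Int × Int)) (h : (its.flatMap contribB).length = 0) :
    (its.map (fun p => PySem.Int.floordiv p.2 2)).sum ≤ 0 := by
  
  induction its with
  | nil => simp
  | cons p r ih =>
    simp only [List.flatMap_cons, List.length_append] at h
    have h1 : contribB p = [] := by
      cases hc : contribB p with
      | nil => rfl
      | cons x xs => simp [hc] at h
    have h2 : p.2 ≤ 1 := by
      by_contra hb
      simp [contribB] at h1
      split_ifs at h1 <;> simp_all <;> omega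
    have h3 : PySem.Int.floordiv p.2 2 ≤ 0 := by
      rw [PySem.Int.floordiv, Int.fdiv_eq_ediv]
      simp; omega
    have := ih (by omega)
    simp only [List.map_cons, List.sum_cons]
    omega

theorem flat_len_one (its : List (Int × Int)) (h : (its.flatMap contribB).length = 1) :
    (its.map (fun p => PySem.Int.floordiv p.2 2)).sum ≤ 1 := by
  
  induction its with
  | nil => simp at h
  | cons p r ih =>
    simp only [List.flatMap_cons, List.length_append] at h
    simp only [List.map_cons, List.sum_cons]
    by_cases h4 : 4 ≤ p.2
    · exfalso; simp [contribB, h4] at h; omega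
    · by_cases h2 : 2 ≤ p.2
      · have hc : (contribB p).length = 1 := by simp [contribB, h4, h2]
        have hr : (r.flatMap contribB).length = 0 := by omega
        have := flat_len_zero r (by omega)
        have hf : PySem.Int.floordiv p.2 2 ≤ 1 := by
          rw [PySem.Int.floordiv, Int.fdiv_eq_ediv]; simp; omega
        omega
      · have hc : (contribB p).length = 0 := by simp [contribB, h4, h2]
        have := ih (by omega)
        have hf : PySem.Int.floordiv p.2 2 ≤ 0 := by
          rw [PySem.Int.floordiv, Int.fdiv_eq_ediv]; simp; omega
        omega

theorem flat_len_ge_two (its : List (Int × Int))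
    (h : ¬ its.foldl (fun acc p => acc + PySem.Int.floordiv p.2 2) 0 < 4) :
    2 ≤ (its.flatMap contribB).length := by
  
  rw [show (fun (acc : Int) (p : Int × Int) => acc + PySem.Int.floordiv p.2 2) =
      (fun acc p => acc + (fun q : Int × Int => PySem.Int.floordiv q.2 2) p) from rfl,
    PySem.List.foldl_add] at h
  by_contra hlt
  interval_cases hlen : (its.flatMap contribB).length
  · have := flat_len_zero its hlen; omega
  · have := flat_len_one its hlen; omega

theorem solve_eq_alt (arr : List Int) : solve arr = solve_alt arr := by
  rw [solve, solve_alt]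
  by_cases hlt : (PySem.Dict.counter arr).values.foldl
      (fun acc c => acc + PySem.Int.floordiv c 2) 0 < 4
  · simp only [hlt, if_true]
  · simp only [hlt, if_false]
    have hval : (PySem.Dict.counter arr).values.foldl
        (fun acc c => acc + PySem.Int.floordiv c 2) 0 =
        (PySem.Dict.counter arr).items.foldl
          (fun acc p => acc + PySem.Int.floordiv p.2 2) 0 := by
      simp only [PySem.Dict.values, List.foldl_map]
    set its := (PySem.Dict.counter arr).items with hits
    set flat := its.flatMap contribB with hflat
    have h2 : 2 ≤ flat.length := flat_len_ge_two its (by rw [← hval]; exact hlt)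
    have hL : its.foldl (fun L p => L ++ contribB p) [] = flat := by
      rw [foldB_flatMap, List.nil_append]
    have hA := foldA_split its (none, none) (none, none) trivial trivial
    rw [← hflat, fold_ins2min_sorted flat, fold_ins2max_sorted flat] at hA
    have hT : PySem.List.sorted flat (fun x => x) true =
        (PySem.List.sorted flat (fun x => x)).reverse := sorted_true_eq_reverse flat
    have hSlen : 2 ≤ (PySem.List.sorted flat (fun x => x)).length := by
      rw [PySem.List.length_sorted]; exact h2
    obtain ⟨a, b, s', hS⟩ : ∃ a b s', PySem.List.sorted flat (fun x => x) = a :: b :: s' := by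
      cases hc : PySem.List.sorted flat (fun x => x) with
      | nil => rw [hc] at hSlen; simp at hSlen
      | cons x xs =>
        cases hx : xs with
        | nil => rw [hc, hx] at hSlen; simp at hSlen
        | cons y ys => exact ⟨x, y, ys, rfl⟩
    have hTlen : 2 ≤ (PySem.List.sorted flat (fun x => x) true).length := by
      rw [PySem.List.length_sorted]; exact h2
    obtain ⟨c, d, t', hTc⟩ : ∃ c d t', PySem.List.sorted flat (fun x => x) true = c :: d :: t' := by
      cases hc : PySem.List.sorted flat (fun x => x) true with
      | nil => rw [hc] at hTlen; simp at hTlen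
      | cons x xs =>
        cases hx : xs with
        | nil => rw [hc, hx] at hTlen; simp at hTlen
        | cons y ys => exact ⟨x, y, ys, rfl⟩
    rw [hL, hA, hS, hTc]
    have hm1 : PySem.List.pyGet? (a :: b :: s') 0 = some a := by
      rw [PySem.List.pyGet?_zero]; rfl
    have hm2 : PySem.List.pyGet? (a :: b :: s') 1 = some b := by
      have := PySem.List.pyGet?_natCast (a :: b :: s') 1
      simpa using this
    have hx1 : PySem.List.pyGet? (a :: b :: s') (-1) = some c := by
      rw [PySem.List.pyGet?_neg_one, ← List.head?_reverse, ← hS, ← hT, hTc]; rfl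
    have hx2 : PySem.List.pyGet? (a :: b :: s') (-2) = some d := by
      have hlen2 : 2 ≤ (a :: b :: s').length := by simp
      rw [PySem.List.pyGet?_neg_ofNat _ 2 (by norm_num) hlen2]
      have hrev : (a :: b :: s').reverse[1]? = (a :: b :: s')[(a :: b :: s').length - 1 - 1]? :=
        List.getElem?_reverse (by simp)
      rw [show (a :: b :: s').length - 2 = (a :: b :: s').length - 1 - 1 by omega, ← hrev,
        ← hS, ← hT, hTc]
      rfl
    rw [hm1, hm2, hx1, hx2]
    rfl

-- ===== VERDICT (by name: the statement is the Claim_ definition above) =====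
theorem solve_spec : Claim_equal_solve := by
  intro arr _
  exact solve_eq_alt arr
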